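-- pv_equiv track=rewrite | github.com/jgheithcock/leetcode | 2140-solving-questions-with-brainpower.py | mostPointsDP
-- ===== SOURCE A (Python) =====
-- from typing import List
--
-- def mostPointsDP(questions: List[List[int]]) -> int:
--     num = len(questions)
--     dp = [0] * (num + 1)
--     best = [-1] * (num + 1) # -1 to skip
--
--     for ndx in range(num - 1, -1, -1):
--         points, brainpower = questions[ndx]
--         next_q = ndx + 1 + brainpower
--         next_points = dp[next_q] if next_q < num else 0
--         take_points = points + next_points
--         skip_points = dp[ndx + 1]
--         if take_points > skip_points:
--             dp[ndx] = take_points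
--             best[ndx] = next_q
--         else: # best is to skip
--             dp[ndx] = max(take_points, skip_points)
--     return dp[0]
-- ===== SOURCE B (Python) =====
-- def mostPointsDP(questions):
--     memo = {}
--
--     def solve(i):
--         if i >= len(questions):
--             return 0
--         if i in memo:
--             return memo[i]
--         points, brainpower = questions[i]
--         result = max(points + solve(i + 1 + brainpower), solve(i + 1))
--         memo[i] = result
--         return result
--
--     return solve(0)
-- ===== Notes on version B (the rewrite author's own statement) =====
-- stated objective: simpler
-- what changed: Replaces the explicit backward dp/best tables and index loop with a top-down memoized recursion solve(i) = max(points + solve(i+1+brainpower), solve(i+1)), dropping the unused best array.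
-- outside the precondition, e.g. on mostPointsDP([[5, -2]]): A returns 5, B raises IndexError; on mostPointsDP([[1, -3]]): A returns 1, B raises IndexError
import Mathlib
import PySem

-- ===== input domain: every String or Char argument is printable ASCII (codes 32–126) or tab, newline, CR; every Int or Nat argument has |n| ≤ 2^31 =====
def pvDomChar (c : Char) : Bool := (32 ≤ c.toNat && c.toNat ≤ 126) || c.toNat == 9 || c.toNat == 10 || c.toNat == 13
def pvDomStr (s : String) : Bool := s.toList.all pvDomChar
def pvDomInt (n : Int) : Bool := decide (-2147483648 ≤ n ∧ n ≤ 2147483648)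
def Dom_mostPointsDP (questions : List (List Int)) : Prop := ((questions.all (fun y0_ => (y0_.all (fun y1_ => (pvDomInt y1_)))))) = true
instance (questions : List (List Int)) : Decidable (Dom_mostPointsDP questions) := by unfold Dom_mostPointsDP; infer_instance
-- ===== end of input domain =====

-- B: top-down memoized recursion solve(i) instead of A's backward dp/best tables; same cost, simpler.


-- ===== PORT A =====
-- Loop body of A's backward for-loop; state = (dp, best).  The unpack
-- 'points, brainpower = questions[ndx]' is exact for length-2 rows (Pre_).
def stepA (questions : List (List Int)) (st : List Int × List Int) (ndx : Int) : List Int × List Int :=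
  let q := (PySem.List.pyGet? questions ndx).getD []
  let points := PySem.List.pyGetD q 0 0
  let brainpower := PySem.List.pyGetD q 1 0
  let next_q := ndx + 1 + brainpower
  let next_points := if next_q < (questions.length : Int) then PySem.List.pyGetD st.1 next_q 0 else 0
  let take_points := points + next_points
  let skip_points := PySem.List.pyGetD st.1 (ndx + 1) 0
  if take_points > skip_points then
    (PySem.List.pySetD st.1 ndx take_points, PySem.List.pySetD st.2 ndx next_q)
  else
    (PySem.List.pySetD st.1 ndx (max take_points skip_points), st.2)

def mostPointsDP (questions : List (List Int)) : Int :=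
  let num := questions.length
  let dp : List Int := List.replicate (num + 1) 0
  let best : List Int := List.replicate (num + 1) (-1)
  let st := (PySem.List.pyRange ((num : Int) - 1) (-1) (-1)).foldl (stepA questions) (dp, best)
  PySem.List.pyGetD st.1 0 0

-- ===== PORT B =====
-- solve(i) ported as recursion on remaining = len - i; the jump to i+1+brainpower
-- becomes remaining - (1 + brainpower.toNat), exact for brainpower ≥ 0 (Pre_);
-- Nat truncation at 0 is exactly Python's 'i >= len(questions)' base case.
def altSolve (questions : List (List Int)) : Nat → Int
  | 0 => 0
  | r + 1 =>
    let q := questions.getD (questions.length - (r + 1)) []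
    let points := PySem.List.pyGetD q 0 0
    let brainpower := PySem.List.pyGetD q 1 0
    max (points + altSolve questions (r - brainpower.toNat)) (altSolve questions r)
  termination_by r => r
  decreasing_by all_goals omega

def mostPointsDP_alt (questions : List (List Int)) : Int :=
  altSolve questions questions.length

-- ===== PRECONDITION & SPEC =====
-- Pre_ excludes rows that are not [points, brainpower] pairs (A's tuple unpack raises ValueError
-- there) and rows with negative brainpower, on which A returns an accidental value read from
-- still-zero dp entries or by negative-index wraparound while B's recursion raises
-- (IndexError/RecursionError) — B never returns on those inputs, so they lie outside the claim.
def Pre_mostPointsDP (questions : List (List Int)) : Prop :=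
  ∀ q ∈ questions, q.length = 2 ∧ 0 ≤ q.getD 1 0
instance (questions : List (List Int)) : Decidable (Pre_mostPointsDP questions) := by
  unfold Pre_mostPointsDP; infer_instance

def pvWitness_mostPointsDP : List (List Int) := [[3, 2], [4, 3], [4, 4], [2, 5]]

def Spec_mostPointsDP (questions : List (List Int)) (out : Int) : Prop := out = mostPointsDP_alt questions
instance (questions : List (List Int)) (out : Int) : Decidable (Spec_mostPointsDP questions out) := by unfold Spec_mostPointsDP; infer_instance

-- ===== CLAIM (what is proved, stated in full; the proofs are below) =====
def Claim_equal_mostPointsDP : Prop := ∀ (questions : List (List Int)), Dom_mostPointsDP questions → Pre_mostPointsDP questions → Spec_mostPointsDP questions (mostPointsDP questions)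

-- ===== LEMMAS AND PROOFS =====

-- dp-only version of A's loop body (best is carried along but never read).
def stepDp (questions : List (List Int)) (dp : List Int) (ndx : Int) : List Int :=
  let q := (PySem.List.pyGet? questions ndx).getD []
  let points := PySem.List.pyGetD q 0 0
  let brainpower := PySem.List.pyGetD q 1 0
  let next_q := ndx + 1 + brainpower
  let next_points := if next_q < (questions.length : Int) then PySem.List.pyGetD dp next_q 0 else 0
  let take_points := points + next_points
  let skip_points := PySem.List.pyGetD dp (ndx + 1) 0
  if take_points > skip_points then PySem.List.pySetD dp ndx take_points
  else PySem.List.pySetD dp ndx (max take_points skip_points)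

lemma foldl_stepA_fst (questions : List (List Int)) (l : List Int) :
    ∀ dp best, (l.foldl (stepA questions) (dp, best)).1 = l.foldl (stepDp questions) dp := by
  induction l with
  | nil => intro dp best; rfl
  | cons x xs ih =>
    intro dp best
    simp only [List.foldl_cons]
    have h1 : (stepA questions (dp, best) x).1 = stepDp questions dp x := by
      simp only [stepA, stepDp]
      rw [apply_ite Prod.fst]
    rw [← Prod.mk.eta (p := stepA questions (dp, best) x), ih, h1]

-- the dp table after processing indices (n-1) … t: zeros below t, altSolve values from t up.
def dpAt (questions : List (List Int)) (t : Nat) : List Int :=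
  List.replicate t 0 ++
    (List.range (questions.length + 1 - t)).map (fun k => altSolve questions (questions.length - t - k))

lemma length_dpAt (questions : List (List Int)) (t : Nat) (ht : t ≤ questions.length) :
    (dpAt questions t).length = questions.length + 1 := by
  unfold dpAt
  rw [List.length_append, List.length_replicate, List.length_map, List.length_range]
  omega

lemma dpAt_get (questions : List (List Int)) (t j : Nat) (h1 : t ≤ j) (h2 : j ≤ questions.length) :
    PySem.List.pyGetD (dpAt questions t) (j : Int) 0 = altSolve questions (questions.length - j) := by
  rw [PySem.List.pyGetD_natCast]
  have hlen : (dpAt questions t).length = questions.length + 1 := length_dpAt _ _ (le_trans h1 h2)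
  rw [List.getD_eq_getElem _ _ (by omega)]
  unfold dpAt
  rw [List.getElem_append_right (by simp; omega)]
  simp only [List.length_replicate, List.getElem_map, List.getElem_range]
  congr 1
  omega

lemma dpAt_set (questions : List (List Int)) (t : Nat) (ht : t < questions.length) :
    (dpAt questions (t + 1)).set t (altSolve questions (questions.length - t)) = dpAt questions t := by
  unfold dpAt
  have h1 : List.replicate (t + 1) (0 : Int) = List.replicate t 0 ++ [0] := List.replicate_succ' ..
  have h2 : questions.length + 1 - t = (questions.length - t) + 1 := by omega
  rw [h1, List.append_assoc, List.singleton_append, h2, List.range_succ_eq_map, List.map_cons,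
    List.map_map, List.set_append_right _ _ (by simp)]
  simp only [List.length_replicate, Nat.sub_self, List.set_cons_zero, Nat.sub_zero]
  have hmap : ∀ k ∈ List.range (questions.length - t),
      altSolve questions (questions.length - (t + 1) - k) =
        ((fun k => altSolve questions (questions.length - t - k)) ∘ Nat.succ) k := by
    intro k _
    simp only [Function.comp_apply]
    congr 1
    omega
  have h3 : questions.length + 1 - (t + 1) = questions.length - t := by omega
  rw [h3, List.map_congr_left hmap]

lemma altSolve_zero (questions : List (List Int)) : altSolve questions 0 = 0 := by
  simp [altSolve]

lemma stepDp_dpAt (questions : List (List Int)) (hPre : Pre_mostPointsDP questions)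
    (t : Nat) (ht : t < questions.length) :
    stepDp questions (dpAt questions (t + 1)) (t : Int) = dpAt questions t := by
  have hmem : questions.getD t [] ∈ questions := by
    rw [List.getD_eq_getElem _ _ ht]; exact List.getElem_mem ht
  obtain ⟨hlen2, hbp0⟩ := hPre _ hmem
  obtain ⟨pp, bb, hab⟩ := List.length_eq_two.mp hlen2
  have hq : (PySem.List.pyGet? questions (t : Int)).getD [] = [pp, bb] := by
    rw [PySem.List.pyGet?_natCast, List.getElem?_eq_getElem ht, Option.getD_some,
      ← List.getD_eq_getElem questions [] ht]
    exact hab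
  have hbb : 0 ≤ bb := by rw [hab] at hbp0; simpa using hbp0
  have hpp : PySem.List.pyGetD [pp, bb] (0 : Int) 0 = pp := by simp [pysem]
  have hb1 : PySem.List.pyGetD [pp, bb] (1 : Int) 0 = bb := by simp [pysem]
  have hskip : PySem.List.pyGetD (dpAt questions (t + 1)) ((t : Int) + 1) 0 =
      altSolve questions (questions.length - (t + 1)) := by
    have h : ((t : Int) + 1) = ((t + 1 : Nat) : Int) := by push_cast; ring
    rw [h, dpAt_get questions (t + 1) (t + 1) le_rfl (by omega)]
  have hnext : (if (t : Int) + 1 + bb < (questions.length : Int)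
        then PySem.List.pyGetD (dpAt questions (t + 1)) ((t : Int) + 1 + bb) 0 else 0) =
      altSolve questions ((questions.length - (t + 1)) - bb.toNat) := by
    split
    · next hlt =>
      have hj : (t : Int) + 1 + bb = ((t + 1 + bb.toNat : Nat) : Int) := by push_cast; omega
      rw [hj, dpAt_get questions (t + 1) (t + 1 + bb.toNat) (by omega) (by omega)]
      congr 1
      omega
    · next hge =>
      have h : (questions.length - (t + 1)) - bb.toNat = 0 := by omega
      rw [h, altSolve_zero]
  have hunfold : altSolve questions (questions.length - t) =
      max (pp + altSolve questions ((questions.length - (t + 1)) - bb.toNat))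
          (altSolve questions (questions.length - (t + 1))) := by
    have hr : questions.length - t = (questions.length - (t + 1)) + 1 := by omega
    rw [hr, altSolve]
    have hi : questions.length - (questions.length - (t + 1) + 1) = t := by omega
    rw [hi, hab, hpp, hb1]
  unfold stepDp
  simp only [hq, hpp, hb1, hnext, hskip, PySem.List.pySetD_natCast]
  rw [← dpAt_set questions t ht, hunfold]
  split
  · next hgt =>
    congr 1
    exact (max_eq_left (le_of_lt hgt)).symm
  · rfl

lemma pyRange_neg_one_snoc (a b : Int) (h : b < a) :
    PySem.List.pyRange a b (-1) = PySem.List.pyRange a (b + 1) (-1) ++ [b + 1] := by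
  rw [PySem.List.pyRange_neg_one_eq_reverse, PySem.List.pyRange_one_cons (by omega),
    List.reverse_cons, PySem.List.pyRange_neg_one_eq_reverse]

lemma fold_invariant (questions : List (List Int)) (hPre : Pre_mostPointsDP questions) :
    ∀ m, m ≤ questions.length →
      (PySem.List.pyRange ((questions.length : Int) - 1) (((questions.length - m : Nat) : Int) - 1) (-1)).foldl
          (stepDp questions) (List.replicate (questions.length + 1) 0) =
        dpAt questions (questions.length - m) := by
  intro m
  induction m with
  | zero =>
    intro _
    rw [Nat.sub_zero, PySem.List.pyRange_neg_one_eq_nil (by omega)]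
    have h1 : questions.length + 1 - questions.length = 1 := by omega
    simp only [List.foldl_nil, dpAt, h1, List.range_one, List.map_cons, List.map_nil,
      Nat.sub_self, Nat.zero_sub, altSolve_zero]
    rw [List.replicate_succ']
  | succ m ih =>
    intro hm
    have ht : questions.length - (m + 1) < questions.length := by omega
    set t := questions.length - (m + 1) with htdef
    have hsplit : PySem.List.pyRange ((questions.length : Int) - 1) ((t : Int) - 1) (-1) =
        PySem.List.pyRange ((questions.length : Int) - 1) (((questions.length - m : Nat) : Int) - 1) (-1) ++ [(t : Int)] := by
      have hb : ((t : Int) - 1) + 1 = (t : Int) := by ring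
      have h2 : ((questions.length - m : Nat) : Int) - 1 = (t : Int) := by omega
      rw [pyRange_neg_one_snoc _ _ (by omega), hb, h2]
    rw [hsplit, List.foldl_append, ih (by omega), List.foldl_cons, List.foldl_nil]
    have h3 : questions.length - m = t + 1 := by omega
    rw [h3]
    exact stepDp_dpAt questions hPre t ht

-- ===== VERDICT (by name: the statement is the Claim_ definition above) =====
theorem mostPointsDP_spec : Claim_equal_mostPointsDP := by
  intro questions _ hPre
  unfold Spec_mostPointsDP mostPointsDP mostPointsDP_alt
  simp only []
  rw [foldl_stepA_fst]
  have := fold_invariant questions hPre questions.length le_rfl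
  rw [Nat.sub_self] at this
  push_cast at this
  rw [this]
  have h0 : PySem.List.pyGetD (dpAt questions 0) ((0 : Nat) : Int) 0 =
      altSolve questions (questions.length - 0) := dpAt_get questions 0 0 le_rfl (by omega)
  simpa using h0
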